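-- pv_equiv track=rewrite | github.com/FocusedConsistency/challenges-dailies | FCC_2026-03-05.py | smallest_gap
-- ===== SOURCE A (Python) =====
-- def smallest_gap(s):
--     if not s:
--         return s
--
--     char_indices = {}
--     for index, char in enumerate(s):
--         char_indices.setdefault(char, []).append(index)
--
--     min_gap = float('inf')
--     min_index = float('inf')
--     max_index = float('inf')
--     for key, value in char_indices.items():
--         if len(value) < 2:
--             continue
--         for i in range(1, len(value)):
--             prev = value[i - 1]
--             curr = value[i]
--             gap = curr - prev - 1
--             if gap < min_gap or (gap == min_gap and prev < min_index):
--                 min_index = prev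
--                 max_index = curr
--                 min_gap = gap
--
--     if min_gap == float('inf'):
--         return s
--     return s[min_index + 1:max_index]
-- ===== SOURCE B (Python) =====
-- def smallest_gap(s):
--     if not s:
--         return s
--
--     best = None  # (gap, left, right)
--     last_seen = {}
--     for i, c in enumerate(s):
--         if c in last_seen:
--             last = last_seen[c]
--             gap = i - last - 1
--             if best is None or gap < best[0] or (gap == best[0] and last < best[1]):
--                 best = (gap, last, i)
--         last_seen[c] = i
--
--     if best is None:
--         return s
--     return s[best[1] + 1:best[2]]
-- ===== Notes on version B (the rewrite author's own statement) =====
-- stated objective: simpler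
-- what changed: Replaced the two-phase approach (build a dict of all occurrence lists per char, then scan every consecutive pair per char) by a single pass that keeps only the last seen index per char and updates the best (gap, left, right) triple on the fly.
import Mathlib
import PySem

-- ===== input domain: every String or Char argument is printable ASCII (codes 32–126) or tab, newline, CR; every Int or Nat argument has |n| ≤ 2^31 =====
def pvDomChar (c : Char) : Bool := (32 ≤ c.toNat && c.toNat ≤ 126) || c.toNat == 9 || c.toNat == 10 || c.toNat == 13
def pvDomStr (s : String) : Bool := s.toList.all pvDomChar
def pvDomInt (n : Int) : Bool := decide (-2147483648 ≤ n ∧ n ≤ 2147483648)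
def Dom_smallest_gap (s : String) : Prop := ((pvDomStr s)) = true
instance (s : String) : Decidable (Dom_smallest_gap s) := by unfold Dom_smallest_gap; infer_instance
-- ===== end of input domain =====

-- B replaces A's two-phase algorithm (dict of all occurrence lists, then scan consecutive
-- pairs per char) by a single pass keeping only the last seen index per char: simpler, same O(n).

-- ===== PORT A =====
def smallest_gap (s : String) : String :=
  if s.toList = [] then s
  else
    -- char_indices: for index, char in enumerate(s): setdefault(char, []).append(index)
    let ci : PySem.Dict Char (List Int) :=
      (PySem.List.enumerate s.toList 0).foldl
        (fun d ic => d.modify ic.2 [] (fun v => v ++ [ic.1])) PySem.Dict.empty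
    -- min_gap/min_index/max_index start at inf: modelled as `none`
    let st : Option (Int × Int × Int) :=
      ci.items.foldl
        (fun st kv =>
          if kv.2.length < 2 then st
          else
            (PySem.List.pyRange 1 (kv.2.length : Int) 1).foldl
              (fun st i =>
                let prev := PySem.List.pyGetD kv.2 (i - 1) 0
                let curr := PySem.List.pyGetD kv.2 i 0
                let gap := curr - prev - 1
                match st with
                | none => some (gap, prev, curr)
                | some (g, mi, ma) =>
                  if gap < g ∨ (gap = g ∧ prev < mi) then some (gap, prev, curr)
                  else some (g, mi, ma))
              st)
        none
    match st with
    | none => s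
    | some (_, mi, ma) => PySem.Str.slice s (some (mi + 1)) (some ma)

-- ===== PORT B =====
def smallest_gap_alt (s : String) : String :=
  if s.toList = [] then s
  else
    let r :=
      (PySem.List.enumerate s.toList 0).foldl
        (fun (st : Option (Int × Int × Int) × PySem.Dict Char Int) ic =>
          let best :=
            match st.2.get? ic.2 with
            | none => st.1
            | some last =>
              let gap := ic.1 - last - 1
              match st.1 with
              | none => some (gap, last, ic.1)
              | some (g, mi, ma) =>
                if gap < g ∨ (gap = g ∧ last < mi) then some (gap, last, ic.1)
                else some (g, mi, ma)
          (best, st.2.insert ic.2 ic.1))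
        (none, PySem.Dict.empty)
    match r.1 with
    | none => s
    | some (_, mi, ma) => PySem.Str.slice s (some (mi + 1)) (some ma)

-- ===== PRECONDITION & SPEC =====
def Spec_smallest_gap (s : String) (out : String) : Prop := out = smallest_gap_alt s
instance (s : String) (out : String) : Decidable (Spec_smallest_gap s out) := by unfold Spec_smallest_gap; infer_instance

-- ===== CLAIM (what is proved, stated in full; the proofs are below) =====
def Claim_equal_smallest_gap : Prop := ∀ (s : String), Dom_smallest_gap s → Spec_smallest_gap s (smallest_gap s)

-- ===== LEMMAS AND PROOFS =====

-- the pair (prev, curr) of adjacent equal-char positions; its gap and A's state triple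
def gapOf (pc : Int × Int) : Int := pc.2 - pc.1 - 1
def stOf (pc : Int × Int) : Int × Int × Int := (gapOf pc, pc.1, pc.2)
-- "pc is strictly better than m" — the update test both programs use
def ltk (a b : Int × Int) : Prop := gapOf a < gapOf b ∨ (gapOf a = gapOf b ∧ a.1 < b.1)
-- the shared update step, on triples (as the ports write it) and on bare pairs
def updT (st : Option (Int × Int × Int)) (pc : Int × Int) : Option (Int × Int × Int) :=
  match st with
  | none => some (gapOf pc, pc.1, pc.2)
  | some (g, mi, ma) =>
    if gapOf pc < g ∨ (gapOf pc = g ∧ pc.1 < mi) then some (gapOf pc, pc.1, pc.2)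
    else some (g, mi, ma)
def upd (st : Option (Int × Int)) (pc : Int × Int) : Option (Int × Int) :=
  match st with
  | none => some pc
  | some m => if gapOf pc < gapOf m ∨ (gapOf pc = gapOf m ∧ pc.1 < m.1) then some pc else some m
-- adjacent pairs of a list, occurrence positions of a char, A's candidate list
def adjP (v : List Int) : List (Int × Int) := v.zip v.tail
def occL (l : List Char) (c : Char) : List Int :=
  (((PySem.List.enumerate l 0).map Prod.swap).filter (fun p => p.1 == c)).map (fun p => p.2)
def FL (l : List Char) : List (Int × Int) := (PySem.Set.ofList l).flatMap (fun c => adjP (occL l c))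
-- B's candidate list, emitted pair by pair
def emitP (seen : PySem.Dict Char Int) (ic : Int × Char) : List (Int × Int) :=
  match seen.get? ic.2 with | none => [] | some last => [(last, ic.1)]
def pairsBAux : List (Int × Char) → PySem.Dict Char Int → List (Int × Int)
  | [], _ => []
  | ic :: rest, seen => emitP seen ic ++ pairsBAux rest (seen.insert ic.2 ic.1)
def seenAfter (E : List (Int × Char)) (seen : PySem.Dict Char Int) : PySem.Dict Char Int :=
  E.foldl (fun d ic => d.insert ic.2 ic.1) seen
def ciL (l : List Char) : PySem.Dict Char (List Int) :=
  (PySem.List.enumerate l 0).foldl (fun d ic => d.modify ic.2 [] (fun v => v ++ [ic.1])) PySem.Dict.empty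

-- step 1: triple-state fold = pair-state fold through stOf
theorem updT_stOf (st : Option (Int × Int)) (pc : Int × Int) :
    updT (Option.map stOf st) pc = Option.map stOf (upd st pc) := by
  cases st with
  | none => rfl
  | some m =>
    simp only [updT, upd, Option.map, stOf]
    split_ifs <;> rfl

theorem foldl_updT_stOf (L : List (Int × Int)) (st : Option (Int × Int)) :
    L.foldl updT (Option.map stOf st) = Option.map stOf (L.foldl upd st) := by
  induction L generalizing st with
  | nil => rfl
  | cons p L ih => simp only [List.foldl_cons, updT_stOf, ih]

-- step 2: A's inner range loop is a fold of updT over adjacent pairs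
theorem inner_aux (v : List Int) (st : Option (Int × Int × Int)) :
    (List.range (v.length - 1)).foldl
      (fun st k => updT st (v.getD k 0, v.getD (k + 1) 0)) st = (adjP v).foldl updT st := by
  induction v generalizing st with
  | nil => rfl
  | cons a w ih =>
    cases w with
    | nil => rfl
    | cons b w' =>
      have hr : (a :: b :: w').length - 1 = (b :: w').length - 1 + 1 := by
        simp [List.length_cons]
      rw [hr, List.range_succ_eq_map]
      simp only [List.foldl_cons, List.foldl_map]
      have := ih (st := updT st (a, b))
      simpa [adjP] using this

theorem inner_eq (v : List Int) (st : Option (Int × Int × Int)) :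
    (PySem.List.pyRange 1 (v.length : Int) 1).foldl
      (fun st i => updT st (PySem.List.pyGetD v (i - 1) 0, PySem.List.pyGetD v i 0)) st
      = (adjP v).foldl updT st := by
  rw [PySem.List.pyRange_one, List.foldl_map]
  have hn : ((v.length : Int) - 1).toNat = v.length - 1 := by omega
  rw [hn, ← inner_aux v st]
  apply PySem.List.foldl_congr_mem
  intro st' k hk
  have h1 : (1 : Int) + (k : Nat) - 1 = ((k : Nat) : Int) := by omega
  have h2 : (1 : Int) + (k : Nat) = (((k + 1 : Nat)) : Int) := by omega
  rw [h1, h2, PySem.List.pyGetD_natCast, PySem.List.pyGetD_natCast]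

theorem adjP_len_lt_two (v : List Int) (h : v.length < 2) : adjP v = [] := by
  match v, h with
  | [], _ => rfl
  | [a], _ => rfl

theorem foldl_adjP_flatMap (items : List (Char × List Int)) (st : Option (Int × Int × Int)) :
    items.foldl (fun st kv => (adjP kv.2).foldl updT st) st
      = (items.flatMap (fun kv => adjP kv.2)).foldl updT st := by
  induction items generalizing st with
  | nil => rfl
  | cons kv rest ih => simp only [List.foldl_cons, List.flatMap_cons, List.foldl_append, ih]

-- step 3: A's dict characterised
theorem ciL_eq_swap (l : List Char) :
    ciL l = ((PySem.List.enumerate l 0).map Prod.swap).foldl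
      (fun d p => d.modify p.1 [] (fun v => v ++ [p.2])) PySem.Dict.empty := by
  unfold ciL
  rw [List.foldl_map]
  simp

theorem getD_ciL (l : List Char) (c : Char) : (ciL l).getD c [] = occL l c := by
  rw [ciL_eq_swap, PySem.Dict.getD_foldl_modify_append]
  simp [occL, PySem.Dict.getD_empty]

theorem keys_ciL (l : List Char) : (ciL l).keys = PySem.Set.ofList l := by
  have h := PySem.Dict.keys_foldl_modify_key (PySem.List.enumerate l 0)
    (fun ic => ic.2) ([] : List Int) (fun d ic => fun v => v ++ [ic.1]) PySem.Dict.empty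
  simpa [ciL, PySem.Dict.keys_empty, PySem.Set.update_nil_left,
    PySem.List.map_snd_enumerate] using h

theorem nodup_keys_ciL (l : List Char) : (ciL l).keys.Nodup := by
  rw [keys_ciL]; exact PySem.Set.nodup_ofList l

theorem items_ciL (l : List Char) :
    (ciL l).items = (PySem.Set.ofList l).map (fun c => (c, occL l c)) := by
  rw [PySem.Dict.items_eq_map_keys (ciL l) (nodup_keys_ciL l) ([] : List Int), keys_ciL]
  exact List.map_congr_left (fun c _ => by rw [getD_ciL])

-- step 4: occurrence lists
theorem mem_occL (l : List Char) (c : Char) (p : Int) :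
    p ∈ occL l c ↔ ∃ (k : Nat) (h : k < l.length), p = (k : Int) ∧ l[k] = c := by
  simp only [occL, List.mem_map, List.mem_filter, PySem.List.mem_enumerate_iff]
  constructor
  · rintro ⟨q, ⟨⟨ic, ⟨k, hk, hic⟩, hswap⟩, hbeq⟩, hq2⟩
    subst hic
    refine ⟨k, hk, ?_, ?_⟩
    · rw [← hq2, ← hswap]; simp
    · have : q.1 = l[k] := by rw [← hswap]; simp
      rw [← beq_iff_eq.mp hbeq, this]
  · rintro ⟨k, hk, rfl, hc⟩
    refine ⟨(c, (k : Int)), ⟨⟨((k : Int), l[k]), ⟨k, hk, by simp⟩, by simp [hc]⟩, by simp⟩, rfl⟩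

theorem pairwise_occL (l : List Char) (c : Char) : (occL l c).Pairwise (· < ·) := by
  apply List.Pairwise.map
  · exact fun p q h => h
  · apply List.Pairwise.filter
    rw [List.pairwise_map]
    exact (PySem.List.pairwise_lt_enumerate l 0).imp (fun h => h)

theorem occL_append (l : List Char) (x c : Char) :
    occL (l ++ [x]) c = occL l c ++ (if x == c then [(l.length : Int)] else []) := by
  simp only [occL, PySem.List.enumerate_append, List.map_append, List.filter_append]
  congr 1
  simp only [PySem.List.enumerate]
  by_cases hxc : x == c <;> simp [hxc, Prod.swap]

theorem occL_ne_nil (l : List Char) (c : Char) (h : c ∈ l) : occL l c ≠ [] := by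
  obtain ⟨k, hk, rfl⟩ := List.mem_iff_getElem.mp h
  have : ((k : Int)) ∈ occL l l[k] := (mem_occL l l[k] k).mpr ⟨k, hk, rfl, rfl⟩
  exact List.ne_nil_of_mem this

-- step 5: adjacent pairs
theorem mem_adjP (v : List Int) (pq : Int × Int) (h : pq ∈ adjP v) : pq.1 ∈ v ∧ pq.2 ∈ v := by
  unfold adjP at h
  obtain ⟨pq1, pq2⟩ := pq
  obtain ⟨h1, h2⟩ := List.of_mem_zip h
  exact ⟨h1, List.mem_of_mem_tail h2⟩

theorem adjP_append_singleton (v : List Int) (y : Int) :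
    adjP (v ++ [y]) = adjP v ++ (match v.getLast? with | none => [] | some a => [(a, y)]) := by
  induction v with
  | nil => rfl
  | cons a w ih =>
    cases w with
    | nil => rfl
    | cons b w' =>
      simp only [adjP, List.cons_append, List.zip_cons_cons, List.tail_cons] at *
      rw [ih, List.getLast?_cons_cons]

theorem adjP_pairwise_lt_fst (v : List Int) (h : v.Pairwise (· < ·)) :
    (adjP v).Pairwise (fun a b => a.1 < b.1) := by
  induction v with
  | nil => exact List.Pairwise.nil
  | cons a w ih =>
    cases w with
    | nil => exact List.Pairwise.nil
    | cons b w' =>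
      have hw : (b :: w').Pairwise (· < ·) := h.tail
      have ha : ∀ x ∈ (b :: w'), a < x := (List.pairwise_cons.mp h).1
      refine List.pairwise_cons.mpr ⟨?_, ih hw⟩
      intro pq hpq
      exact ha pq.1 (mem_adjP _ pq hpq).1

-- two occurrence lists of different chars are disjoint
theorem occL_disjoint (l : List Char) (c c' : Char) (p : Int)
    (h : p ∈ occL l c) (h' : p ∈ occL l c') : c = c' := by
  obtain ⟨k, hk, rfl, hc⟩ := (mem_occL l c p).mp h
  obtain ⟨k', hk', hkk, hc'⟩ := (mem_occL l c' _).mp h'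
  have : k = k' := by exact_mod_cast hkk
  subst this
  rw [← hc, ← hc']

theorem flatMap_adjP_pairwise (l : List Char) (ks : List Char) (hnd : ks.Nodup) :
    (ks.flatMap (fun c => adjP (occL l c))).Pairwise (fun a b => a.1 ≠ b.1) := by
  induction ks with
  | nil => exact List.Pairwise.nil
  | cons c rest ih =>
    rw [List.flatMap_cons, List.pairwise_append]
    refine ⟨?_, ih hnd.of_cons, ?_⟩
    · exact (adjP_pairwise_lt_fst _ (pairwise_occL l c)).imp (fun h => by omega)
    · intro a ha b hb hab
      obtain ⟨c', hc', hb'⟩ := List.mem_flatMap.mp hb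
      have h1 : a.1 ∈ occL l c := (mem_adjP _ a ha).1
      have h2 : b.1 ∈ occL l c' := (mem_adjP _ b hb').1
      rw [hab] at h1
      have : c = c' := occL_disjoint l c c' b.1 h1 h2
      exact (List.nodup_cons.mp hnd).1 (this ▸ hc')

-- step 6: A's candidate list has pairwise-distinct left endpoints
theorem FL_pairwise (l : List Char) : (FL l).Pairwise (fun a b => a.1 ≠ b.1) := by
  exact flatMap_adjP_pairwise l _ (PySem.Set.nodup_ofList l)

-- step 7: the fold computes the unique (gap, left)-lexicographic minimum
theorem ltk_trans {a b c : Int × Int} (h1 : ltk a b) (h2 : ltk b c) : ltk a c := by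
  unfold ltk at *; omega

theorem foldl_upd_some (L : List (Int × Int)) (m0 : Int × Int) :
    ∃ m, L.foldl upd (some m0) = some m ∧ m ∈ m0 :: L ∧ ∀ x ∈ m0 :: L, ¬ ltk x m := by
  induction L generalizing m0 with
  | nil =>
    refine ⟨m0, rfl, by simp, ?_⟩
    intro x hx
    simp at hx
    subst hx
    unfold ltk; omega
  | cons p L ih =>
    simp only [List.foldl_cons]
    by_cases hc : ltk p m0
    · have hc' := hc; unfold ltk at hc'
      have : upd (some m0) p = some p := by
        simp only [upd]; rw [if_pos hc']
      rw [this]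
      obtain ⟨m, hm, hmem, hmin⟩ := ih p
      refine ⟨m, hm, ?_, ?_⟩
      · rcases List.mem_cons.mp hmem with h | h
        · simp [h]
        · simp [h]
      · intro x hx
        rcases List.mem_cons.mp hx with rfl | hx'
        · -- x = m0 : ¬ ltk m0 m; from ¬ltk p ... hmm need: ltk m0 m → ltk p m? no:
          -- ltk p m0; if ltk m0 m then ltk p m (trans) contradiction with hmin p.
          intro hcon
          exact hmin p (by simp) (ltk_trans hc hcon)
        · exact hmin x (by simp [hx'])
    · have hc' := hc; unfold ltk at hc'
      have : upd (some m0) p = some m0 := by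
        simp only [upd]; rw [if_neg hc']
      rw [this]
      obtain ⟨m, hm, hmem, hmin⟩ := ih m0
      refine ⟨m, hm, ?_, ?_⟩
      · rcases List.mem_cons.mp hmem with h | h
        · simp [h]
        · simp [h]
      · intro x hx
        rcases List.mem_cons.mp hx with rfl | hx'
        · exact hmin x (by simp)
        · rcases List.mem_cons.mp hx' with rfl | hx''
          · -- x = p, ¬ ltk p m0, m minimal in m0::L: if ltk p m: m ... m could beat m0.
            -- ¬ ltk p m0 means m0 ≤ p in key order... and ¬ ltk x m for x in m0::L.
            -- suppose ltk p m. m ∈ m0::L. hmm need totality: ¬ltk p m0 → (ltk m0 p ∨ keys equal).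
            -- then ltk p m ∧ (m0 ≤ p) → ltk m0 m? if ltk m0 p then trans ltk m0 m contra hmin m0.
            -- if keys equal (gap p = gap m0 ∧ p.1 = m0.1) then ltk p m ↔ ltk m0 m, contra.
            intro hcon
            have hm0 : ¬ ltk m0 m := hmin m0 (by simp)
            unfold ltk at *
            omega
          · exact hmin x (by simp [hx''])

theorem foldl_upd_none_spec (L : List (Int × Int)) (h : L ≠ []) :
    ∃ m, L.foldl upd none = some m ∧ m ∈ L ∧ ∀ x ∈ L, ¬ ltk x m := by
  cases L with
  | nil => exact absurd rfl h
  | cons p L =>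
    simp only [List.foldl_cons]
    have : upd none p = some p := rfl
    rw [this]
    obtain ⟨m, hm, hmem, hmin⟩ := foldl_upd_some L p
    exact ⟨m, hm, hmem, hmin⟩

theorem min_unique (L : List (Int × Int)) (hpw : L.Pairwise (fun a b => a.1 ≠ b.1))
    (m m' : Int × Int) (hm : m ∈ L) (hm' : m' ∈ L)
    (h1 : ∀ x ∈ L, ¬ ltk x m) (h2 : ∀ x ∈ L, ¬ ltk x m') : m = m' := by
  by_contra hne
  have hsym : Symmetric (fun a b : Int × Int => a.1 ≠ b.1) := fun a b h => h.symm
  have hfst : m.1 ≠ m'.1 := hpw.forall hsym hm hm' hne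
  have := h1 m' hm'
  have := h2 m hm
  unfold ltk at *
  omega

theorem foldl_upd_perm (P1 P2 : List (Int × Int)) (hp : P1.Perm P2)
    (hpw : P1.Pairwise (fun a b => a.1 ≠ b.1)) :
    P1.foldl upd none = P2.foldl upd none := by
  cases h1 : P1 with
  | nil =>
    subst h1
    rw [hp.symm.eq_nil]
  | cons p L =>
    have hne1 : P1 ≠ [] := by simp [h1]
    have hne2 : P2 ≠ [] := by
      intro hnil
      rw [hnil] at hp
      exact hne1 hp.eq_nil
    rw [← h1]
    obtain ⟨m, hmr, hmem, hmin⟩ := foldl_upd_none_spec P1 hne1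
    obtain ⟨m', hmr', hmem', hmin'⟩ := foldl_upd_none_spec P2 hne2
    rw [hmr, hmr']
    have hmem'' : m' ∈ P1 := (hp.mem_iff).mpr hmem'
    have hmin'' : ∀ x ∈ P1, ¬ ltk x m' := fun x hx => hmin' x (hp.mem_iff.mp hx)
    rw [min_unique P1 hpw m m' hmem hmem'' hmin hmin'']

-- step 8: B's pass
theorem B_fold_split (E : List (Int × Char)) (best : Option (Int × Int × Int))
    (seen : PySem.Dict Char Int) :
    E.foldl
      (fun (st : Option (Int × Int × Int) × PySem.Dict Char Int) ic =>
        let b :=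
          match st.2.get? ic.2 with
          | none => st.1
          | some last =>
            let gap := ic.1 - last - 1
            match st.1 with
            | none => some (gap, last, ic.1)
            | some (g, mi, ma) =>
              if gap < g ∨ (gap = g ∧ last < mi) then some (gap, last, ic.1)
              else some (g, mi, ma)
        (b, st.2.insert ic.2 ic.1)) (best, seen)
      = ((pairsBAux E seen).foldl updT best, seenAfter E seen) := by
  induction E generalizing best seen with
  | nil => rfl
  | cons ic E ih =>
    simp only [List.foldl_cons]
    rw [ih]
    cases hg : seen.get? ic.2 with
    | none =>
      simp only [pairsBAux, emitP, hg, List.nil_append, seenAfter, List.foldl_cons]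
    | some last =>
      simp only [pairsBAux, emitP, hg, List.singleton_append, List.foldl_cons,
        seenAfter, updT, gapOf]

theorem pairsBAux_append (E : List (Int × Char)) (x : Int × Char) (seen : PySem.Dict Char Int) :
    pairsBAux (E ++ [x]) seen = pairsBAux E seen ++ emitP (seenAfter E seen) x := by
  induction E generalizing seen with
  | nil => simp [pairsBAux, seenAfter]
  | cons ic E ih =>
    simp only [List.cons_append, pairsBAux, ih, seenAfter, List.foldl_cons, List.append_assoc]

theorem get?_seenAfter (l : List Char) (c : Char) :
    (seenAfter (PySem.List.enumerate l 0) PySem.Dict.empty).get? c = (occL l c).getLast? := by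
  induction l using List.reverseRecOn with
  | nil => simp [seenAfter, occL, PySem.List.enumerate, PySem.Dict.get?_empty]
  | append_singleton l x ih =>
    have he : PySem.List.enumerate (l ++ [x]) 0
        = PySem.List.enumerate l 0 ++ [((l.length : Int), x)] := by
      rw [PySem.List.enumerate_append]
      simp [PySem.List.enumerate]
    rw [he, occL_append]
    unfold seenAfter
    rw [List.foldl_append]
    simp only [List.foldl_cons, List.foldl_nil]
    rw [PySem.Dict.get?_insert]
    by_cases hcx : c = x
    · subst hcx
      simp
    · have : (x == c) = false := beq_eq_false_iff_ne.mpr (Ne.symm hcx)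
      simp only [this, if_neg hcx, Bool.false_eq_true, if_false, List.append_nil]
      exact ih

-- shifting a singleton out of the middle of a concatenation is a permutation
theorem permShift (A B C : List (Int × Int)) (p : Int × Int) :
    ((A ++ B ++ C) ++ [p]).Perm (A ++ (B ++ [p]) ++ C) := by
  have h1 : ((A ++ B ++ C) ++ [p]).Perm (p :: (A ++ B ++ C)) := List.perm_append_comm
  have h2 : ((A ++ B) ++ p :: C).Perm (p :: ((A ++ B) ++ C)) := List.perm_middle
  have h3 : A ++ (B ++ [p]) ++ C = (A ++ B) ++ p :: C := by simp [List.append_assoc]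
  rw [h3]
  exact h1.trans h2.symm

theorem occL_nil_of_not_mem (l : List Char) (x : Char) (hx : x ∉ l) : occL l x = [] := by
  rw [List.eq_nil_iff_forall_not_mem]
  intro p hp
  obtain ⟨k, hk, rfl, hc⟩ := (mem_occL l x p).mp hp
  exact hx (hc ▸ List.getElem_mem hk)

theorem flatMap_congr' {α β : Type} (s : List α) (f g : α → List β)
    (h : ∀ c ∈ s, f c = g c) : s.flatMap f = s.flatMap g := by
  induction s with
  | nil => rfl
  | cons a s ih =>
    simp only [List.flatMap_cons, h a (by simp), ih (fun c hc => h c (by simp [hc]))]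

theorem occL_append_ne (l : List Char) (x c : Char) (hcx : c ≠ x) :
    occL (l ++ [x]) c = occL l c := by
  rw [occL_append]
  simp [beq_eq_false_iff_ne.mpr (Ne.symm hcx)]

-- step 9: B's candidate list is a permutation of A's
theorem pairsB_perm_FL (l : List Char) :
    (pairsBAux (PySem.List.enumerate l 0) PySem.Dict.empty).Perm (FL l) := by
  induction l using List.reverseRecOn with
  | nil => simp [PySem.List.enumerate, pairsBAux, FL, PySem.Set.ofList]
  | append_singleton l x ih =>
    have he : PySem.List.enumerate (l ++ [x]) 0
        = PySem.List.enumerate l 0 ++ [((l.length : Int), x)] := by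
      rw [PySem.List.enumerate_append]
      simp [PySem.List.enumerate]
    rw [he, pairsBAux_append]
    have hemit : emitP (seenAfter (PySem.List.enumerate l 0) PySem.Dict.empty)
        ((l.length : Int), x) = (match (occL l x).getLast? with
          | none => [] | some a => [(a, (l.length : Int))]) := by
      unfold emitP
      rw [get?_seenAfter]
    by_cases hx : x ∈ l
    · -- x occurs: exactly one new candidate pair appears, inside the flatMap
      have hocc : occL l x ≠ [] := occL_ne_nil l x hx
      obtain ⟨a, ha⟩ : ∃ a, (occL l x).getLast? = some a := by
        cases hgl : (occL l x).getLast? with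
        | none => exact absurd (List.getLast?_eq_none_iff.mp hgl) hocc
        | some a => exact ⟨a, rfl⟩
      rw [hemit, ha]
      have hofl : PySem.Set.ofList (l ++ [x]) = PySem.Set.ofList l := by
        rw [PySem.Set.ofList_append_singleton,
          PySem.Set.add_of_mem ((PySem.Set.mem_ofList l x).mpr hx)]
      obtain ⟨s₁, s₂, hsplit⟩ := List.append_of_mem ((PySem.Set.mem_ofList l x).mpr hx)
      have hnd : (PySem.Set.ofList l).Nodup := PySem.Set.nodup_ofList l
      rw [hsplit] at hnd
      have hnd2 : (x :: (s₁ ++ s₂)).Nodup := (List.perm_middle).nodup hnd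
      have hxs : x ∉ s₁ ++ s₂ := (List.nodup_cons.mp hnd2).1
      have hs₁ : s₁.flatMap (fun c => adjP (occL (l ++ [x]) c))
          = s₁.flatMap (fun c => adjP (occL l c)) := by
        apply flatMap_congr'
        intro c hc
        rw [occL_append_ne l x c (fun hcx => hxs (hcx ▸ List.mem_append_left s₂ hc))]
      have hs₂ : s₂.flatMap (fun c => adjP (occL (l ++ [x]) c))
          = s₂.flatMap (fun c => adjP (occL l c)) := by
        apply flatMap_congr'
        intro c hc
        rw [occL_append_ne l x c (fun hcx => hxs (hcx ▸ List.mem_append_right s₁ hc))]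
      have hmid : adjP (occL (l ++ [x]) x)
          = adjP (occL l x) ++ [(a, (l.length : Int))] := by
        rw [occL_append]
        simp only [BEq.rfl, if_pos]
        rw [adjP_append_singleton, ha]
      have hFLx : FL (l ++ [x])
          = s₁.flatMap (fun c => adjP (occL l c)) ++
            ((adjP (occL l x) ++ [(a, (l.length : Int))]) ++
             s₂.flatMap (fun c => adjP (occL l c))) := by
        unfold FL
        rw [hofl, hsplit, List.flatMap_append, List.flatMap_cons, hs₁, hs₂, hmid]
      have hFLl : FL l
          = s₁.flatMap (fun c => adjP (occL l c)) ++
            (adjP (occL l x) ++ s₂.flatMap (fun c => adjP (occL l c))) := by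
        unfold FL
        rw [hsplit, List.flatMap_append, List.flatMap_cons]
      refine (ih.append_right _).trans ?_
      rw [hFLx, hFLl]
      simpa [List.append_assoc] using
        permShift (s₁.flatMap (fun c => adjP (occL l c))) (adjP (occL l x))
          (s₂.flatMap (fun c => adjP (occL l c))) (a, (l.length : Int))
    · -- x is new: no candidate pair appears on either side
      have hocc0 : occL l x = [] := occL_nil_of_not_mem l x hx
      rw [hemit, hocc0]
      simp only [List.getLast?_nil, List.append_nil]
      have hofl : PySem.Set.ofList (l ++ [x]) = PySem.Set.ofList l ++ [x] := by
        rw [PySem.Set.ofList_append_singleton,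
          PySem.Set.add_of_not_mem (fun hc => hx ((PySem.Set.mem_ofList l x).mp hc))]
      have hFL : FL (l ++ [x]) = FL l := by
        unfold FL
        rw [hofl, List.flatMap_append]
        have h2 : (([x] : List Char).flatMap (fun c => adjP (occL (l ++ [x]) c))) = [] := by
          simp only [List.flatMap_cons, List.flatMap_nil, List.append_nil]
          rw [occL_append, hocc0]
          simp [adjP]
        rw [h2, List.append_nil]
        apply flatMap_congr'
        intro c hc
        rw [occL_append_ne l x c
          (fun hcx => hx (hcx ▸ (PySem.Set.mem_ofList l c).mp hc))]
      rw [hFL]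
      exact ih

-- final assembly: each port equals the canonical "minimum over candidate pairs" result
def canonRes (s : String) (st : Option (Int × Int × Int)) : String :=
  match st with
  | none => s
  | some (_, mi, ma) => PySem.Str.slice s (some (mi + 1)) (some ma)

theorem A_state (l : List Char) :
    (ciL l).items.foldl
      (fun st kv =>
        if kv.2.length < 2 then st
        else
          (PySem.List.pyRange 1 (kv.2.length : Int) 1).foldl
            (fun st i =>
              let prev := PySem.List.pyGetD kv.2 (i - 1) 0
              let curr := PySem.List.pyGetD kv.2 i 0
              let gap := curr - prev - 1
              match st with
              | none => some (gap, prev, curr)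
              | some (g, mi, ma) =>
                if gap < g ∨ (gap = g ∧ prev < mi) then some (gap, prev, curr)
                else some (g, mi, ma))
            st)
      none
      = Option.map stOf ((FL l).foldl upd none) := by
  have hbody : (fun (st : Option (Int × Int × Int)) (kv : Char × List Int) =>
      if kv.2.length < 2 then st
      else
        (PySem.List.pyRange 1 (kv.2.length : Int) 1).foldl
          (fun st i =>
            let prev := PySem.List.pyGetD kv.2 (i - 1) 0
            let curr := PySem.List.pyGetD kv.2 i 0
            let gap := curr - prev - 1
            match st with
            | none => some (gap, prev, curr)
            | some (g, mi, ma) =>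
              if gap < g ∨ (gap = g ∧ prev < mi) then some (gap, prev, curr)
              else some (g, mi, ma))
          st)
      = fun st kv => (adjP kv.2).foldl updT st := by
    funext st kv
    by_cases hl : kv.2.length < 2
    · rw [if_pos hl, adjP_len_lt_two kv.2 hl]
      rfl
    · rw [if_neg hl]
      exact inner_eq kv.2 st
  rw [hbody, foldl_adjP_flatMap, items_ciL, List.flatMap_map]
  exact foldl_updT_stOf (FL l) none

theorem B_state (l : List Char) :
    ((PySem.List.enumerate l 0).foldl
      (fun (st : Option (Int × Int × Int) × PySem.Dict Char Int) ic =>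
        let best :=
          match st.2.get? ic.2 with
          | none => st.1
          | some last =>
            let gap := ic.1 - last - 1
            match st.1 with
            | none => some (gap, last, ic.1)
            | some (g, mi, ma) =>
              if gap < g ∨ (gap = g ∧ last < mi) then some (gap, last, ic.1)
              else some (g, mi, ma)
        (best, st.2.insert ic.2 ic.1))
      (none, PySem.Dict.empty)).1
      = Option.map stOf ((pairsBAux (PySem.List.enumerate l 0) PySem.Dict.empty).foldl upd none) := by
  rw [B_fold_split]
  exact foldl_updT_stOf (pairsBAux (PySem.List.enumerate l 0) PySem.Dict.empty) none

theorem A_canon (s : String) :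
    smallest_gap s = if s.toList = [] then s
      else canonRes s (Option.map stOf ((FL s.toList).foldl upd none)) := by
  unfold smallest_gap
  by_cases h : s.toList = []
  · simp [h]
  · simp only [if_neg h]
    exact congrArg (canonRes s) (A_state s.toList)

theorem B_canon (s : String) :
    smallest_gap_alt s = if s.toList = [] then s
      else canonRes s (Option.map stOf
        ((pairsBAux (PySem.List.enumerate s.toList 0) PySem.Dict.empty).foldl upd none)) := by
  unfold smallest_gap_alt
  by_cases h : s.toList = []
  · simp [h]
  · simp only [if_neg h]
    exact congrArg (canonRes s) (B_state s.toList)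

-- ===== VERDICT (by name: the statement is the Claim_ definition above) =====
theorem smallest_gap_spec : Claim_equal_smallest_gap := by
  intro s _
  unfold Spec_smallest_gap
  rw [A_canon, B_canon,
    foldl_upd_perm (FL s.toList) (pairsBAux (PySem.List.enumerate s.toList 0) PySem.Dict.empty)
      (pairsB_perm_FL s.toList).symm (FL_pairwise s.toList)]
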